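-- pv_equiv track=rewrite | github.com/abc1199281/repo-lantern | src/lantern_cli/core/planning_tools.py | prepare_layer_summary
-- ===== SOURCE A (Python) =====
-- def prepare_layer_summary(layers: dict[str, int], max_chars: int = 4000) -> str:
--     """Format layer analysis as readable text.
--
--     Args:
--         layers: Mapping of file to layer index.
--         max_chars: Maximum output length in characters.
--
--     Returns:
--         Formatted layer summary grouped by layer.
--     """
--     if not layers:
--         return "No layer information available."
--
--     # Group by layer
--     layer_groups: dict[int, list[str]] = {}
--     for file_path, layer_idx in layers.items():
--         if layer_idx not in layer_groups:
--             layer_groups[layer_idx] = []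
--         layer_groups[layer_idx].append(file_path)
--
--     lines: list[str] = []
--     for idx in sorted(layer_groups.keys()):
--         files = sorted(layer_groups[idx])
--         label = "Cycle" if idx == -1 else f"Layer {idx}"
--         description = ""
--         if idx == 0:
--             description = " (leaf nodes, no outgoing dependencies)"
--         elif idx == -1:
--             description = " (circular dependencies detected)"
--         lines.append(f"### {label}{description}")
--         lines.append(f"{len(files)} file(s):")
--         for f in files:
--             lines.append(f"  - {f}")
--         lines.append("")
--
--     result = "\n".join(lines)
--     if len(result) > max_chars:
--         result = result[:max_chars] + "\n\n...(truncated)"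
--     return result
-- ===== SOURCE B (Python) =====
-- def prepare_layer_summary(layers: dict[str, int], max_chars: int = 4000) -> str:
--     """Format layer analysis as readable text (single sort + linear group scan)."""
--     if not layers:
--         return "No layer information available."
--
--     items = sorted(layers.items(), key=lambda kv: (kv[1], kv[0]))
--
--     lines: list[str] = []
--     i, n = 0, len(items)
--     while i < n:
--         idx = items[i][1]
--         j = i
--         while j < n and items[j][1] == idx:
--             j += 1
--         files = [path for path, _ in items[i:j]]
--         label = "Cycle" if idx == -1 else f"Layer {idx}"
--         if idx == 0:
--             description = " (leaf nodes, no outgoing dependencies)"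
--         elif idx == -1:
--             description = " (circular dependencies detected)"
--         else:
--             description = ""
--         lines.append(f"### {label}{description}")
--         lines.append(f"{len(files)} file(s):")
--         for f in files:
--             lines.append(f"  - {f}")
--         lines.append("")
--         i = j
--
--     result = "\n".join(lines)
--     if len(result) > max_chars:
--         result = result[:max_chars] + "\n\n...(truncated)"
--     return result
-- ===== Notes on version B (the rewrite author's own statement) =====
-- stated objective: alternative
-- what changed: Replaces the dict-of-buckets build followed by sorting the keys and each bucket separately with a single sort of all items by the tuple (layer, path) and one linear scan that emits each group's block directly.
import Mathlib
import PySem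

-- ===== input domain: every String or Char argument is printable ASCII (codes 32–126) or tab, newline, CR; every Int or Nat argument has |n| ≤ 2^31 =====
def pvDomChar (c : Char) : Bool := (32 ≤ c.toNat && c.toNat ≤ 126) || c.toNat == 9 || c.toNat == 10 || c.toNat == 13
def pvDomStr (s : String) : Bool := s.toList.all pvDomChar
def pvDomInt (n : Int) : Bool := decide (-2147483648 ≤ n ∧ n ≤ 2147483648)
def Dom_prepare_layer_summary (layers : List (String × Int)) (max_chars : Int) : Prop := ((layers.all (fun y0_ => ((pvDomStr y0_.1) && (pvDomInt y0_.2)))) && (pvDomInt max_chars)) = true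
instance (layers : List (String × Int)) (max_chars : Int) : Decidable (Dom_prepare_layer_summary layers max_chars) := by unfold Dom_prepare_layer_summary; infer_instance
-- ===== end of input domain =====

-- B replaces A's dict-of-buckets build plus per-bucket sorts with one sort of all items by
-- (layer, path) and a single linear scan that emits each group's block (objective: alternative).
-- The Python dict parameter 'layers' arrives as an association list; both ports decode it with
-- PySem.Dict.ofList (duplicate keys: last value wins, first position — Python dict semantics).

-- ===== PORT A =====
def prepare_layer_summary (layers : List (String × Int)) (max_chars : Int) : String :=
  if layers.isEmpty then "No layer information available." else
  let layer_groups : PySem.Dict Int (List String) :=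
    (PySem.Dict.ofList layers).items.foldl (fun g p =>
      let g := if g.contains p.2 then g else g.insert p.2 []
      g.modify p.2 [] (fun fs => fs ++ [p.1])) PySem.Dict.empty
  let lines : List String :=
    (PySem.List.sorted layer_groups.keys (fun k => k)).foldl (fun lines idx =>
      let files := PySem.List.sorted (layer_groups.getD idx []) (fun f => f)
      let label := if idx = -1 then "Cycle" else "Layer " ++ PySem.Int.toStr idx
      let description :=
        if idx = 0 then " (leaf nodes, no outgoing dependencies)"
        else if idx = -1 then " (circular dependencies detected)"
        else ""
      let lines := lines ++ ["### " ++ label ++ description]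
      let lines := lines ++ [PySem.Int.toStr (PySem.List.len files) ++ " file(s):"]
      let lines := files.foldl (fun ls f => ls ++ ["  - " ++ f]) lines
      lines ++ [""]) []
  let result := PySem.Str.join "\n" lines
  if PySem.Str.len result > max_chars then
    PySem.Str.slice result none (some max_chars) ++ "\n\n...(truncated)"
  else result

-- ===== PORT B =====
-- one group's block of output lines (label/description branches as in Source B's loop body)
def pvBlock (idx : Int) (files : List String) : List String :=
  let label := if idx = -1 then "Cycle" else "Layer " ++ PySem.Int.toStr idx
  let description :=
    if idx = 0 then " (leaf nodes, no outgoing dependencies)"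
    else if idx = -1 then " (circular dependencies detected)"
    else ""
  ["### " ++ label ++ description, PySem.Int.toStr (PySem.List.len files) ++ " file(s):"]
    ++ files.map (fun f => "  - " ++ f) ++ [""]

def pvGroupLines : List (String × Int) → List String
  | [] => []
  | (path, idx) :: rest =>
    pvBlock idx (path :: (rest.takeWhile (fun q => q.2 == idx)).map (fun q => q.1))
      ++ pvGroupLines (rest.dropWhile (fun q => q.2 == idx))
termination_by l => l.length
decreasing_by
  simp only [List.length_cons]
  exact Nat.lt_succ_of_le (List.length_dropWhile_le _ _)

def prepare_layer_summary_alt (layers : List (String × Int)) (max_chars : Int) : String :=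
  if layers.isEmpty then "No layer information available." else
  let items := PySem.List.sorted2 (PySem.Dict.ofList layers).items (fun kv => kv.2) (fun kv => kv.1)
  let result := PySem.Str.join "\n" (pvGroupLines items)
  if PySem.Str.len result > max_chars then
    PySem.Str.slice result none (some max_chars) ++ "\n\n...(truncated)"
  else result

-- ===== PRECONDITION & SPEC =====
def Spec_prepare_layer_summary (layers : List (String × Int)) (max_chars : Int) (out : String) : Prop := out = prepare_layer_summary_alt layers max_chars
instance (layers : List (String × Int)) (max_chars : Int) (out : String) : Decidable (Spec_prepare_layer_summary layers max_chars out) := by unfold Spec_prepare_layer_summary; infer_instance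

-- ===== CLAIM (what is proved, stated in full; the proofs are below) =====
def Claim_equal_prepare_layer_summary : Prop := ∀ (layers : List (String × Int)) (max_chars : Int), Dom_prepare_layer_summary layers max_chars → Spec_prepare_layer_summary layers max_chars (prepare_layer_summary layers max_chars)

-- ===== LEMMAS AND PROOFS =====
theorem pvStep_eq (g : PySem.Dict Int (List String)) (p : String × Int) :
    (if g.contains p.2 then g else g.insert p.2 ([] : List String)).modify p.2 []
        (fun fs => fs ++ [p.1]) =
      g.modify p.2 [] (fun fs => fs ++ [p.1]) := by
  by_cases h : g.contains p.2 = true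
  · simp [h]
  · have h' : g.contains p.2 = false := by simpa using h
    have hkeys : ∀ q ∈ g.items, q.1 ≠ p.2 := by
      intro q hq hqe
      have : g.contains p.2 = true := by
        rw [PySem.Dict.contains_iff_mem_keys]
        have : q.1 ∈ g.items.map (fun r => r.1) := List.mem_map_of_mem hq
        simpa [PySem.Dict.keys, hqe] using this
      rw [h'] at this; exact Bool.false_ne_true this
    simp only [h', Bool.false_eq_true, if_false]
    unfold PySem.Dict.modify
    rw [PySem.Dict.getD_insert_self, PySem.Dict.getD_of_not_contains (h := h')]
    apply PySem.Dict.ext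
    rw [PySem.Dict.items_insert_of_not_contains _ _ h']
    rw [PySem.Dict.items_insert_of_contains _ _ (by simp [PySem.Dict.contains_insert_self])]
    rw [PySem.Dict.items_insert_of_not_contains _ _ h']
    rw [List.map_append]
    congr 1
    · conv_rhs => rw [← List.map_id' (g.items)]
      apply List.map_congr_left
      intro q hq
      simp [show (q.1 == p.2) = false from beq_eq_false_iff_ne.mpr (hkeys q hq)]
    · simp

theorem pvGroups_eq (its : List (String × Int)) :
    (its.foldl (fun g p =>
        let g := if g.contains p.2 then g else g.insert p.2 ([] : List String)
        g.modify p.2 [] (fun fs => fs ++ [p.1])) PySem.Dict.empty) =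
      (its.map Prod.swap).foldl (fun g q => g.modify q.1 [] (fun fs => fs ++ [q.2]))
        PySem.Dict.empty := by
  rw [List.foldl_map]
  apply PySem.List.foldl_congr_mem
  intro acc x _
  exact pvStep_eq acc x

theorem pvGroups_getD (its : List (String × Int)) (c : Int) :
    (its.foldl (fun g p =>
        let g := if g.contains p.2 then g else g.insert p.2 ([] : List String)
        g.modify p.2 [] (fun fs => fs ++ [p.1])) PySem.Dict.empty).getD c [] =
      (its.filter (fun p => p.2 == c)).map (fun p => p.1) := by
  rw [pvGroups_eq, PySem.Dict.getD_foldl_modify_append]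
  rw [show (fun (p : Int × String) => p.1 == c) = ((fun (q : Int × String) => q.1 == c)) from rfl]
  rw [List.filter_map (f := Prod.swap) (p := fun q => q.1 == c)]
  simp [PySem.Dict.getD_empty, List.map_map]
  rfl

theorem pvGroups_keys (its : List (String × Int)) :
    (its.foldl (fun g p =>
        let g := if g.contains p.2 then g else g.insert p.2 ([] : List String)
        g.modify p.2 [] (fun fs => fs ++ [p.1])) PySem.Dict.empty).keys =
      PySem.Set.ofList (its.map (fun p => p.2)) := by
  rw [pvGroups_eq, PySem.Dict.keys_foldl_modify_key _ Prod.fst [] (fun g q => fun fs => fs ++ [q.2])]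
  simp [PySem.Dict.keys_empty, PySem.Set.update_nil_left, List.map_map]
  rfl

theorem pvSorted2_eq_sorted_lex {α κ₁ κ₂ : Type} [LinearOrder κ₁] [LinearOrder κ₂]
    (xs : List α) (k1 : α → κ₁) (k2 : α → κ₂) :
    PySem.List.sorted2 xs k1 k2 = PySem.List.sorted xs (fun a => toLex (k1 a, k2 a)) := by
  unfold PySem.List.sorted2 PySem.List.sorted
  simp only [reduceIte, Bool.false_eq_true]
  congr 1
  funext acc x
  congr 1
  funext a b
  have hlex : (toLex (k1 a, k2 a) < toLex (k1 b, k2 b)) ↔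
      (k1 a < k1 b ∨ (k1 a = k1 b ∧ k2 a < k2 b)) := Prod.Lex.lt_iff
  by_cases h1 : k1 a < k1 b
  · simp [h1, hlex]
  · by_cases h2 : k1 b < k1 a
    · have hne : k1 a ≠ k1 b := fun he => absurd (he ▸ h2) (lt_irrefl _)
      simp [h1, h2, hlex, hne]
    · have he : k1 a = k1 b := le_antisymm (not_lt.mp h2) (not_lt.mp h1)
      simp only [he] at h1 hlex ⊢
      simp [hlex]

theorem pvTakeWhile_all_append {α : Type} (p : α → Bool) (l₁ l₂ : List α)
    (h₁ : ∀ x ∈ l₁, p x = true) (h₂ : ∀ x ∈ l₂, p x = false) :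
    (l₁ ++ l₂).takeWhile p = l₁ ∧ (l₁ ++ l₂).dropWhile p = l₂ := by
  induction l₁ with
  | nil =>
    simp only [List.nil_append]
    cases l₂ with
    | nil => simp
    | cons y t =>
      have hy := h₂ y (by simp)
      simp [hy]
  | cons x t ih =>
    have hx := h₁ x (by simp)
    have := ih (fun z hz => h₁ z (by simp [hz]))
    simp [hx, this.1, this.2]

theorem pvFlatMap_filter_perm (S : List Int) (l : List (String × Int)) (hnd : S.Nodup)
    (hcov : ∀ p ∈ l, p.2 ∈ S) :
    (S.flatMap (fun c => l.filter (fun p => p.2 == c))).Perm l := by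
  induction S generalizing l with
  | nil =>
    cases l with
    | nil => simp
    | cons q t => exact absurd (hcov q (by simp)) (by simp)
  | cons c S' ih =>
    rw [List.flatMap_cons]
    have hrw : ∀ c' ∈ S', l.filter (fun p => p.2 == c') =
        (l.filter (fun p => !(p.2 == c))).filter (fun p => p.2 == c') := by
      intro c' hc'
      have hcc : c' ≠ c := fun he => (List.nodup_cons.mp hnd).1 (he ▸ hc')
      rw [List.filter_filter]
      apply List.filter_congr
      intro q _
      by_cases hq : q.2 = c'
      · simp [hq, hcc]
      · simp [hq]
    have hfm : S'.flatMap (fun c' => l.filter (fun p => p.2 == c')) =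
        S'.flatMap (fun c' => (l.filter (fun p => !(p.2 == c))).filter (fun p => p.2 == c')) := by
      exact List.flatMap_congr hrw
    rw [hfm]
    have ihp := ih (l.filter (fun p => !(p.2 == c))) (List.nodup_cons.mp hnd).2 (by
      intro q hq
      have hm := List.mem_filter.mp hq
      have := hcov q hm.1
      rcases List.mem_cons.mp this with h | h
      · exact absurd (show (q.2 == c) = true by simp [h]) (by simpa using hm.2)
      · exact h)
    exact (List.Perm.append_left _ ihp).trans (List.filter_append_perm _ l)

theorem pvPairwise_flatMap (S : List Int) (F : Int → List String)
    (hS : S.Pairwise (· < ·)) (hF : ∀ c ∈ S, (F c).Pairwise (· < ·)) :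
    (S.flatMap (fun c => (F c).map (fun f => (f, c)))).Pairwise
      (fun a b => (toLex (a.2, a.1) : Lex (Int × String)) < toLex (b.2, b.1)) := by
  induction S with
  | nil => simp
  | cons c S' ih =>
    rw [List.flatMap_cons, List.pairwise_append]
    refine ⟨?_, ?_, ?_⟩
    · rw [List.pairwise_map]
      refine (hF c (by simp)).imp ?_
      intro a b hab
      exact Prod.Lex.lt_iff.mpr (Or.inr ⟨rfl, hab⟩)
    · exact ih (List.pairwise_cons.mp hS).2 (fun c' hc' => hF c' (by simp [hc']))
    · intro a ha b hb
      obtain ⟨fa, _, rfl⟩ := List.mem_map.mp ha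
      obtain ⟨c', hc', hb'⟩ := List.mem_flatMap.mp hb
      obtain ⟨fb, _, rfl⟩ := List.mem_map.mp hb'
      exact Prod.Lex.lt_iff.mpr (Or.inl ((List.pairwise_cons.mp hS).1 c' hc'))

theorem pvGroupLines_flatMap (S : List Int) (F : Int → List String) (hnd : S.Nodup)
    (hne : ∀ c ∈ S, F c ≠ []) :
    pvGroupLines (S.flatMap (fun c => (F c).map (fun f => (f, c)))) =
      S.flatMap (fun c => pvBlock c (F c)) := by
  induction S with
  | nil => simp only [List.flatMap_nil, pvGroupLines]
  | cons c S' ih =>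
    obtain ⟨f, ft, hfc⟩ := List.exists_cons_of_ne_nil (hne c (by simp))
    rw [List.flatMap_cons, List.flatMap_cons, hfc]
    have hrest : ∀ x ∈ S'.flatMap (fun c' => (F c').map (fun f => (f, c'))),
        (x.2 == c) = false := by
      intro x hx
      obtain ⟨c', hc', hx'⟩ := List.mem_flatMap.mp hx
      obtain ⟨fx, _, rfl⟩ := List.mem_map.mp hx'
      have : c' ≠ c := fun he => (List.nodup_cons.mp hnd).1 (he ▸ hc')
      simpa using this
    have htd := pvTakeWhile_all_append (fun q => q.2 == c)
      (ft.map (fun f => (f, c))) (S'.flatMap (fun c' => (F c').map (fun f => (f, c'))))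
      (by intro x hx; obtain ⟨fx, _, rfl⟩ := List.mem_map.mp hx; simp)
      hrest
    rw [List.map_cons, List.cons_append]
    rw [pvGroupLines]
    rw [htd.1, htd.2]
    rw [ih (List.nodup_cons.mp hnd).2 (fun c' hc' => hne c' (by simp [hc']))]
    congr 2
    rw [List.map_map]
    exact congrArg (f :: ·) (List.map_id' ft)

theorem pvFlatMap_perm_congr {α β : Type} (S : List α) (g g' : α → List β)
    (h : ∀ c ∈ S, (g c).Perm (g' c)) : (S.flatMap g).Perm (S.flatMap g') := by
  induction S with
  | nil => simp
  | cons c S' ih =>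
    rw [List.flatMap_cons, List.flatMap_cons]
    exact (h c (by simp)).append (ih (fun c' hc' => h c' (by simp [hc'])))

theorem pvSorted2_eq_flatMap (its : List (String × Int)) (hk : (its.map (fun p => p.1)).Nodup) :
    PySem.List.sorted2 its (fun kv => kv.2) (fun kv => kv.1) =
      (PySem.List.sorted (PySem.Set.ofList (its.map (fun p => p.2))) (fun k => k)).flatMap
        (fun c => (PySem.List.sorted ((its.filter (fun p => p.2 == c)).map (fun p => p.1))
            (fun f => f)).map (fun f => (f, c))) := by
  rw [pvSorted2_eq_sorted_lex]
  apply PySem.List.sorted_eq_of_perm_of_pairwise_lt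
  · -- permutation
    have h1 : ∀ c : Int,
        ((PySem.List.sorted ((its.filter (fun p => p.2 == c)).map (fun p => p.1))
            (fun f => f)).map (fun f => (f, c))).Perm (its.filter (fun p => p.2 == c)) := by
      intro c
      refine ((PySem.List.sorted_perm _ _ _).map (fun f => (f, c))).trans ?_
      rw [List.map_map]
      have he : ∀ p ∈ its.filter (fun p => p.2 == c),
          ((fun f => (f, c)) ∘ fun (p : String × Int) => p.1) p = p := by
        intro p hp'
        have h2 : p.2 = c := by simpa using (List.mem_filter.mp hp').2
        cases p with | mk a b => simp at h2; simp [h2]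
      rw [List.map_congr_left he, List.map_id']
    have hS : (PySem.List.sorted (PySem.Set.ofList (its.map (fun p => p.2))) (fun k => k)).Nodup :=
      (PySem.List.sorted_perm _ _ _).symm.nodup (PySem.Set.nodup_ofList _)
    refine (pvFlatMap_perm_congr _ _ _ (fun c _ => h1 c)).trans ?_
    apply pvFlatMap_filter_perm _ _ hS
    intro p hp
    rw [PySem.List.mem_sorted, PySem.Set.mem_ofList]
    exact List.mem_map_of_mem hp
  · -- strictly increasing under the lex key
    apply pvPairwise_flatMap
    · exact PySem.List.sorted_ofList_pairwise_lt _
    · intro c _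
      have hle := PySem.List.sorted_pairwise
        ((its.filter (fun p => p.2 == c)).map (fun p => p.1)) (fun f => f)
      have hnd : (PySem.List.sorted ((its.filter (fun p => p.2 == c)).map (fun p => p.1))
          (fun f => f)).Nodup := by
        refine (PySem.List.sorted_perm _ _ _).symm.nodup ?_
        exact ((List.filter_sublist).map (fun p : String × Int => p.1)).nodup hk
      refine (hle.and hnd).imp ?_
      intro a b hab
      exact lt_iff_le_and_ne.mpr hab

theorem pvBodyA (lg : PySem.Dict Int (List String)) (S : List Int) (acc : List String) :
    S.foldl (fun lines idx =>
      let files := PySem.List.sorted (lg.getD idx []) (fun f => f)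
      let label := if idx = -1 then "Cycle" else "Layer " ++ PySem.Int.toStr idx
      let description :=
        if idx = 0 then " (leaf nodes, no outgoing dependencies)"
        else if idx = -1 then " (circular dependencies detected)"
        else ""
      let lines := lines ++ ["### " ++ label ++ description]
      let lines := lines ++ [PySem.Int.toStr (PySem.List.len files) ++ " file(s):"]
      let lines := files.foldl (fun ls f => ls ++ ["  - " ++ f]) lines
      lines ++ [""]) acc =
    acc ++ S.flatMap (fun idx => pvBlock idx (PySem.List.sorted (lg.getD idx []) (fun f => f))) := by
  have hb : ∀ (lines : List String) (idx : Int), idx ∈ S →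
      (let files := PySem.List.sorted (lg.getD idx []) (fun f => f)
       let label := if idx = -1 then "Cycle" else "Layer " ++ PySem.Int.toStr idx
       let description :=
         if idx = 0 then " (leaf nodes, no outgoing dependencies)"
         else if idx = -1 then " (circular dependencies detected)"
         else ""
       let lines := lines ++ ["### " ++ label ++ description]
       let lines := lines ++ [PySem.Int.toStr (PySem.List.len files) ++ " file(s):"]
       let lines := files.foldl (fun ls f => ls ++ ["  - " ++ f]) lines
       lines ++ [""]) =
      lines ++ pvBlock idx (PySem.List.sorted (lg.getD idx []) (fun f => f)) := by
    intro lines idx _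
    simp only [PySem.List.foldl_append_singleton_eq_map, pvBlock]
    simp [List.append_assoc]
  exact Eq.trans (PySem.List.foldl_congr_mem S _ _ acc hb) (PySem.List.foldl_append_eq_flatMap _ _ _)

theorem pvLines_eq (layers : List (String × Int)) :
    (PySem.List.sorted ((PySem.Dict.ofList layers).items.foldl (fun g p =>
        let g := if g.contains p.2 then g else g.insert p.2 ([] : List String)
        g.modify p.2 [] (fun fs => fs ++ [p.1])) PySem.Dict.empty).keys (fun k => k)).foldl
      (fun lines idx =>
        let files := PySem.List.sorted (((PySem.Dict.ofList layers).items.foldl (fun g p =>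
            let g := if g.contains p.2 then g else g.insert p.2 ([] : List String)
            g.modify p.2 [] (fun fs => fs ++ [p.1])) PySem.Dict.empty).getD idx []) (fun f => f)
        let label := if idx = -1 then "Cycle" else "Layer " ++ PySem.Int.toStr idx
        let description :=
          if idx = 0 then " (leaf nodes, no outgoing dependencies)"
          else if idx = -1 then " (circular dependencies detected)"
          else ""
        let lines := lines ++ ["### " ++ label ++ description]
        let lines := lines ++ [PySem.Int.toStr (PySem.List.len files) ++ " file(s):"]
        let lines := files.foldl (fun ls f => ls ++ ["  - " ++ f]) lines
        lines ++ [""]) [] =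
    pvGroupLines (PySem.List.sorted2 (PySem.Dict.ofList layers).items
      (fun kv => kv.2) (fun kv => kv.1)) := by
  set its := (PySem.Dict.ofList layers).items with hits
  have hk : (its.map (fun p => p.1)).Nodup := by
    have := PySem.Dict.nodup_keys_ofList layers
    simpa [PySem.Dict.keys, hits] using this
  have hSnd : (PySem.List.sorted (PySem.Set.ofList (its.map (fun p => p.2))) (fun k => k)).Nodup :=
    (PySem.List.sorted_perm _ _ _).symm.nodup (PySem.Set.nodup_ofList _)
  rw [pvBodyA, pvGroups_keys, List.nil_append]
  rw [pvSorted2_eq_flatMap its hk, pvGroupLines_flatMap _ _ hSnd]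
  · exact List.flatMap_congr (fun c _ => by rw [pvGroups_getD])
  · intro c hc
    rw [PySem.List.mem_sorted, PySem.Set.mem_ofList] at hc
    obtain ⟨p, hp, rfl⟩ := List.mem_map.mp hc
    rw [Ne, PySem.List.sorted_eq_nil_iff, List.map_eq_nil_iff, List.filter_eq_nil_iff]
    intro h
    exact absurd (by simp) (h p hp)

-- ===== VERDICT (by name: the statement is the Claim_ definition above) =====
theorem prepare_layer_summary_spec : Claim_equal_prepare_layer_summary := by
  intro layers mc _
  unfold Spec_prepare_layer_summary
  unfold prepare_layer_summary prepare_layer_summary_alt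
  by_cases he : layers.isEmpty
  · simp [he]
  · simp only [he, Bool.false_eq_true, if_false]
    rw [pvLines_eq layers]
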